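-- pv_equiv track=rewrite | github.com/GiuliaLanzillotta/bytebybyte | environments.py | get_box_indices
-- ===== SOURCE A (Python) =====
-- def get_box_indices(input_size, permutation_size):
--
--     margin = (input_size - permutation_size)//2
--
--
--     permutation_indices = [] #flattened image indices
--     mask = []
--
--     for i in range(input_size):
--         row_index = i*input_size
--         for j in range(input_size):
--             if i>margin and i<margin+permutation_size \
--             and j>margin and j<margin+permutation_size:
--                 permutation_indices.append(row_index+j)
--                 mask.append(True)
--             else: mask.append(False)
--
--     return permutation_indices, mask
-- ===== SOURCE B (Python) =====
-- def get_box_indices(input_size, permutation_size):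
--     margin = (input_size - permutation_size) // 2
--     lo = max(0, margin + 1)
--     hi = min(input_size, margin + permutation_size)
--     permutation_indices = [i * input_size + j
--                            for i in range(lo, hi) for j in range(lo, hi)]
--     in_row = []
--     if lo < hi:  # build the box row only when the box is nonempty
--         in_row = ([False] * lo) + ([True] * (hi - lo)) + ([False] * (input_size - hi))
--     out_row = [False] * input_size
--     mask = []
--     for i in range(input_size):
--         mask.extend(in_row if lo <= i < hi else out_row)
--     return permutation_indices, mask
-- ===== Notes on version B (the rewrite author's own statement) =====
-- stated objective: simpler
-- what changed: Instead of testing the box condition at every one of the n*n cells in a nested loop, B clamps the valid row/column interval [lo,hi) once and builds the indices by a comprehension over the box only and the mask row-by-row from prebuilt False/True blocks.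
import Mathlib
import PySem

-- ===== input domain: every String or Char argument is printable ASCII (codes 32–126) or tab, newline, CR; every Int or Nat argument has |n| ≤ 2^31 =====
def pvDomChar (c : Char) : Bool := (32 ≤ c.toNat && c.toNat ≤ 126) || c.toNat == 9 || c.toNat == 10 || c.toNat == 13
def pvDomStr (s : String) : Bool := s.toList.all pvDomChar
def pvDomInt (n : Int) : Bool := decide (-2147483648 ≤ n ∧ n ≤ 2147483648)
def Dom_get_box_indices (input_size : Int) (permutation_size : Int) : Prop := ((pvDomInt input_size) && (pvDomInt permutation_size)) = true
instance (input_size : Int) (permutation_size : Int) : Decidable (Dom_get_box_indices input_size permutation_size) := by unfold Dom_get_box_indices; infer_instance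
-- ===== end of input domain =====

-- B builds the indices and mask by rows of the clamped box range instead of testing every cell; objective: simpler.

-- ===== PORT A =====
def get_box_indices (input_size : Int) (permutation_size : Int) : List Int × List Bool :=
  let margin := PySem.Int.floordiv (input_size - permutation_size) 2
  (PySem.List.pyRange 0 input_size 1).foldl (fun st i =>
    let row_index := i * input_size
    (PySem.List.pyRange 0 input_size 1).foldl (fun st2 j =>
      if margin < i ∧ i < margin + permutation_size ∧ margin < j ∧ j < margin + permutation_size then
        (st2.1 ++ [row_index + j], st2.2 ++ [true])
      else
        (st2.1, st2.2 ++ [false])) st) ([], [])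

-- ===== PORT B =====
def get_box_indices_alt (input_size : Int) (permutation_size : Int) : List Int × List Bool :=
  let margin := PySem.Int.floordiv (input_size - permutation_size) 2
  let lo := max 0 (margin + 1)
  let hi := min input_size (margin + permutation_size)
  let permutation_indices := (PySem.List.pyRange lo hi 1).flatMap (fun i =>
    (PySem.List.pyRange lo hi 1).map (fun j => i * input_size + j))
  let in_row := if lo < hi then
      List.replicate lo.toNat false ++ List.replicate (hi - lo).toNat true ++
      List.replicate (input_size - hi).toNat false
    else []
  let out_row := List.replicate input_size.toNat false
  let mask := (PySem.List.pyRange 0 input_size 1).foldl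
    (fun m i => m ++ (if lo ≤ i ∧ i < hi then in_row else out_row)) []
  (permutation_indices, mask)

-- ===== PRECONDITION & SPEC =====
def Spec_get_box_indices (input_size : Int) (permutation_size : Int) (out : List Int × List Bool) : Prop := out = get_box_indices_alt input_size permutation_size
instance (input_size : Int) (permutation_size : Int) (out : List Int × List Bool) : Decidable (Spec_get_box_indices input_size permutation_size out) := by unfold Spec_get_box_indices; infer_instance

-- ===== CLAIM (what is proved, stated in full; the proofs are below) =====
def Claim_equal_get_box_indices : Prop := ∀ (input_size : Int) (permutation_size : Int), Dom_get_box_indices input_size permutation_size → Spec_get_box_indices input_size permutation_size (get_box_indices input_size permutation_size)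

-- ===== LEMMAS AND PROOFS =====

-- fold that appends two independent blocks per element = pair of flatMaps
theorem pv_foldl_prod_append {α β γ : Type} (l : List γ) (f : γ → List α) (g : γ → List β)
    (st : List α × List β) :
    l.foldl (fun st x => (st.1 ++ f x, st.2 ++ g x)) st = (st.1 ++ l.flatMap f, st.2 ++ l.flatMap g) := by
  induction l generalizing st with
  | nil => simp
  | cons a t ih => simp [ih]

-- inner loop over a stretch where the condition is everywhere false
theorem pv_inner_false (C : Int → Prop) [DecidablePred C] (ri : Int) (l : List Int)
    (h : ∀ j ∈ l, ¬ C j) (st : List Int × List Bool) :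
    l.foldl (fun st2 j => if C j then (st2.1 ++ [ri + j], st2.2 ++ [true])
      else (st2.1, st2.2 ++ [false])) st = (st.1, st.2 ++ List.replicate l.length false) := by
  induction l generalizing st with
  | nil => simp
  | cons a t ih =>
    have ha : ¬ C a := h a (List.mem_cons_self)
    simp only [List.foldl_cons, if_neg ha]
    rw [ih (fun j hj => h j (List.mem_cons_of_mem _ hj))]
    simp [List.replicate_succ]

-- inner loop over a stretch where the condition is everywhere true
theorem pv_inner_true (C : Int → Prop) [DecidablePred C] (ri : Int) (l : List Int)
    (h : ∀ j ∈ l, C j) (st : List Int × List Bool) :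
    l.foldl (fun st2 j => if C j then (st2.1 ++ [ri + j], st2.2 ++ [true])
      else (st2.1, st2.2 ++ [false])) st
      = (st.1 ++ l.map (fun j => ri + j), st.2 ++ List.replicate l.length true) := by
  induction l generalizing st with
  | nil => simp
  | cons a t ih =>
    have ha : C a := h a (List.mem_cons_self)
    simp only [List.foldl_cons, if_pos ha]
    rw [ih (fun j hj => h j (List.mem_cons_of_mem _ hj))]
    simp [List.replicate_succ]

theorem pv_flatMap_ite {α : Type} (l : List Int) (c : Int → Prop) [DecidablePred c]
    (f : Int → List α) :
    (l.flatMap (fun i => if c i then f i else [])) = (l.filter (fun i => decide (c i))).flatMap f := by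
  induction l with
  | nil => simp
  | cons a t ih =>
    by_cases h : c a <;> simp [h, ih]

theorem pv_filter_pyRange (n lo hi : Int) (hlo : 0 ≤ lo) (hhi : hi ≤ n) :
    (PySem.List.pyRange 0 n 1).filter (fun i => decide (lo ≤ i ∧ i < hi)) = PySem.List.pyRange lo hi 1 := by
  by_cases hle : hi ≤ lo
  · rw [PySem.List.pyRange_one_eq_nil hle, List.filter_eq_nil_iff]
    intro x _
    simp only [decide_eq_true_eq]
    omega
  · have h2 : lo ≤ hi := by omega
    rw [PySem.List.pyRange_one_append 0 lo n hlo (by omega),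
        PySem.List.pyRange_one_append lo hi n h2 hhi, List.filter_append, List.filter_append]
    have e1 : (PySem.List.pyRange 0 lo 1).filter (fun i => decide (lo ≤ i ∧ i < hi)) = [] := by
      rw [List.filter_eq_nil_iff]
      intro x hx
      have hb := (PySem.List.mem_pyRange_one).mp hx
      simp only [decide_eq_true_eq]
      omega
    have e2 : (PySem.List.pyRange lo hi 1).filter (fun i => decide (lo ≤ i ∧ i < hi)) = PySem.List.pyRange lo hi 1 := by
      rw [List.filter_eq_self]
      intro x hx
      have hb := (PySem.List.mem_pyRange_one).mp hx
      simp only [decide_eq_true_eq]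
      omega
    have e3 : (PySem.List.pyRange hi n 1).filter (fun i => decide (lo ≤ i ∧ i < hi)) = [] := by
      rw [List.filter_eq_nil_iff]
      intro x hx
      have hb := (PySem.List.mem_pyRange_one).mp hx
      simp only [decide_eq_true_eq]
      omega
    rw [e1, e2, e3]
    simp

-- one row of A's double loop, for a row index inside [0, n)
theorem pv_row (n p i : Int) (h0 : 0 ≤ i) (hn : i < n) (st : List Int × List Bool) :
    (PySem.List.pyRange 0 n 1).foldl (fun st2 j =>
      if PySem.Int.floordiv (n - p) 2 < i ∧ i < PySem.Int.floordiv (n - p) 2 + p ∧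
         PySem.Int.floordiv (n - p) 2 < j ∧ j < PySem.Int.floordiv (n - p) 2 + p then
        (st2.1 ++ [i * n + j], st2.2 ++ [true])
      else (st2.1, st2.2 ++ [false])) st
    = (st.1 ++ (if max 0 (PySem.Int.floordiv (n - p) 2 + 1) ≤ i ∧ i < min n (PySem.Int.floordiv (n - p) 2 + p) then
          (PySem.List.pyRange (max 0 (PySem.Int.floordiv (n - p) 2 + 1)) (min n (PySem.Int.floordiv (n - p) 2 + p)) 1).map (fun j => i * n + j) else []),
       st.2 ++ (if max 0 (PySem.Int.floordiv (n - p) 2 + 1) ≤ i ∧ i < min n (PySem.Int.floordiv (n - p) 2 + p) then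
          (if max 0 (PySem.Int.floordiv (n - p) 2 + 1) < min n (PySem.Int.floordiv (n - p) 2 + p) then
            List.replicate (max 0 (PySem.Int.floordiv (n - p) 2 + 1)).toNat false ++
            List.replicate (min n (PySem.Int.floordiv (n - p) 2 + p) - max 0 (PySem.Int.floordiv (n - p) 2 + 1)).toNat true ++
            List.replicate (n - min n (PySem.Int.floordiv (n - p) 2 + p)).toNat false
          else [])
        else List.replicate n.toNat false)) := by
  set m := PySem.Int.floordiv (n - p) 2 with hm
  by_cases hin : max 0 (m + 1) ≤ i ∧ i < min n (m + p)
  · have h1 : (0:Int) ≤ max 0 (m + 1) := by omega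
    have h2 : max 0 (m + 1) ≤ min n (m + p) := by omega
    have h3 : min n (m + p) ≤ n := by omega
    rw [PySem.List.pyRange_one_append 0 (max 0 (m + 1)) n h1 (by omega),
        PySem.List.pyRange_one_append (max 0 (m + 1)) (min n (m + p)) n h2 h3,
        List.foldl_append, List.foldl_append]
    have c1 : ∀ j ∈ PySem.List.pyRange 0 (max 0 (m + 1)) 1,
        ¬(m < i ∧ i < m + p ∧ m < j ∧ j < m + p) := by
      intro j hj
      have hb := (PySem.List.mem_pyRange_one).mp hj
      omega
    have c2 : ∀ j ∈ PySem.List.pyRange (max 0 (m + 1)) (min n (m + p)) 1,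
        (m < i ∧ i < m + p ∧ m < j ∧ j < m + p) := by
      intro j hj
      have hb := (PySem.List.mem_pyRange_one).mp hj
      omega
    have c3 : ∀ j ∈ PySem.List.pyRange (min n (m + p)) n 1,
        ¬(m < i ∧ i < m + p ∧ m < j ∧ j < m + p) := by
      intro j hj
      have hb := (PySem.List.mem_pyRange_one).mp hj
      omega
    rw [pv_inner_false _ _ _ c1, pv_inner_true _ _ _ c2, pv_inner_false _ _ _ c3]
    simp only [if_pos hin, if_pos (show max 0 (m + 1) < min n (m + p) by omega)]
    simp [PySem.List.length_pyRange_one, List.append_assoc]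
  · have c0 : ∀ j ∈ PySem.List.pyRange 0 n 1,
        ¬(m < i ∧ i < m + p ∧ m < j ∧ j < m + p) := by
      intro j hj
      have hb := (PySem.List.mem_pyRange_one).mp hj
      omega
    rw [pv_inner_false _ _ _ c0]
    simp only [if_neg hin]
    simp [PySem.List.length_pyRange_one]

-- ===== VERDICT (by name: the statement is the Claim_ definition above) =====
theorem get_box_indices_spec : Claim_equal_get_box_indices := by
  intro n p _
  simp only [Spec_get_box_indices, get_box_indices, get_box_indices_alt]
  set m := PySem.Int.floordiv (n - p) 2 with hm
  have h1 : (PySem.List.pyRange 0 n 1).foldl (fun st i =>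
      (PySem.List.pyRange 0 n 1).foldl (fun st2 j =>
        if m < i ∧ i < m + p ∧ m < j ∧ j < m + p then
          (st2.1 ++ [i * n + j], st2.2 ++ [true])
        else (st2.1, st2.2 ++ [false])) st) ([], [])
      = (PySem.List.pyRange 0 n 1).foldl (fun st i =>
        (st.1 ++ (if max 0 (m + 1) ≤ i ∧ i < min n (m + p) then
            (PySem.List.pyRange (max 0 (m + 1)) (min n (m + p)) 1).map (fun j => i * n + j) else []),
         st.2 ++ (if max 0 (m + 1) ≤ i ∧ i < min n (m + p) then
            (if max 0 (m + 1) < min n (m + p) then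
              List.replicate (max 0 (m + 1)).toNat false ++
              List.replicate (min n (m + p) - max 0 (m + 1)).toNat true ++
              List.replicate (n - min n (m + p)).toNat false
            else [])
          else List.replicate n.toNat false))) ([], []) := by
    apply PySem.List.foldl_congr_mem
    intro st i hmem
    have hb := (PySem.List.mem_pyRange_one).mp hmem
    exact pv_row n p i hb.1 hb.2 st
  rw [h1, pv_foldl_prod_append]
  rw [PySem.List.foldl_append_eq_flatMap]
  refine Prod.ext ?_ ?_
  · simp only [List.nil_append]
    rw [pv_flatMap_ite, pv_filter_pyRange n (max 0 (m + 1)) (min n (m + p)) (by omega) (by omega)]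
  · simp
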